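-- pv_equiv track=rewrite | github.com/RayChang987/easy_ideal_sta | read_def.py | fast_partition_mst
-- ===== SOURCE A (Python) =====
-- def get_manhattan_dist(p1, p2):
--     return abs(p1[0] - p2[0]) + abs(p1[1] - p2[1])
--
-- def fast_partition_mst(points):
--
--     pts_sorted = sorted(points, key=lambda p: p[0])
--
--     chunk_size = 100
--     chunks = [
--         pts_sorted[i : i + chunk_size] for i in range(0, len(pts_sorted), chunk_size)
--     ]
--
--     total_approx_len = 0
--     last_point_of_prev_chunk = None
--
--     for chunk in chunks:
--
--         total_approx_len += basic_prim(chunk)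
--
--
--         if last_point_of_prev_chunk:
--
--             total_approx_len += get_manhattan_dist(last_point_of_prev_chunk, chunk[0])
--         last_point_of_prev_chunk = chunk[-1]
--
--     return total_approx_len
--
-- def basic_prim(pts):
--
--     n = len(pts)
--     if n <= 1:
--         return 0
--     visited = [False] * n
--     min_dist = [float("inf")] * n
--     min_dist[0] = 0
--     total = 0
--     for _ in range(n):
--         u = -1
--         curr_m = float("inf")
--         for i in range(n):
--             if not visited[i] and min_dist[i] < curr_m:
--                 curr_m = min_dist[i]
--                 u = i
--         if u == -1:
--             break
--         visited[u] = True
--         total += curr_m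
--         for v in range(n):
--             if not visited[v]:
--                 d = abs(pts[u][0] - pts[v][0]) + abs(pts[u][1] - pts[v][1])
--                 if d < min_dist[v]:
--                     min_dist[v] = d
--     return total
-- ===== SOURCE B (Python) =====
-- def get_manhattan_dist(p1, p2):
--     return abs(p1[0] - p2[0]) + abs(p1[1] - p2[1])
--
--
-- def basic_prim(pts):
--     # Lazy Prim over a bag of candidate edges: when a vertex joins the tree its
--     # edges to all vertices still outside are appended (stale duplicates stay in
--     # the bag); each round takes the lexicographically smallest candidate edge
--     # and discards every edge into the absorbed vertex.  There is no per-vertex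
--     # best-distance array, no decrease-key relaxation and no index scan; the
--     # total is the MST weight all the same because the bag always contains, for
--     # each outside vertex, its cheapest edge to the tree.
--     n = len(pts)
--     if n <= 1:
--         return 0
--     outside = list(range(1, n))
--     bag = [(get_manhattan_dist(pts[0], pts[v]), v) for v in outside]
--     total = 0
--     while outside:
--         d, u = min(bag)
--         total += d
--         outside.remove(u)
--         bag = [e for e in bag if e[1] != u]
--         bag += [(get_manhattan_dist(pts[u], pts[v]), v) for v in outside]
--     return total
--
--
-- def fast_partition_mst(points):
--     pts_sorted = sorted(points, key=lambda p: p[0])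
--     chunk_size = 100
--     chunks = [pts_sorted[i:i + chunk_size]
--               for i in range(0, len(pts_sorted), chunk_size)]
--     return sum(basic_prim(c) for c in chunks) + sum(
--         get_manhattan_dist(a[-1], b[0]) for a, b in zip(chunks, chunks[1:]))
-- ===== Notes on version B (the rewrite author's own statement) =====
-- stated objective: alternative
-- what changed: basic_prim is rewritten as lazy Prim: instead of a per-vertex best-distance array with a min-scan over indices and decrease-key relaxation, B keeps a bag of candidate edges (with stale duplicates), each round pops the lexicographically smallest edge from the bag and discards edges into the absorbed vertex; the chunk loop with its last-point accumulator becomes two sums (per-chunk MSTs plus zip-based connecting distances).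
import Mathlib
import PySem

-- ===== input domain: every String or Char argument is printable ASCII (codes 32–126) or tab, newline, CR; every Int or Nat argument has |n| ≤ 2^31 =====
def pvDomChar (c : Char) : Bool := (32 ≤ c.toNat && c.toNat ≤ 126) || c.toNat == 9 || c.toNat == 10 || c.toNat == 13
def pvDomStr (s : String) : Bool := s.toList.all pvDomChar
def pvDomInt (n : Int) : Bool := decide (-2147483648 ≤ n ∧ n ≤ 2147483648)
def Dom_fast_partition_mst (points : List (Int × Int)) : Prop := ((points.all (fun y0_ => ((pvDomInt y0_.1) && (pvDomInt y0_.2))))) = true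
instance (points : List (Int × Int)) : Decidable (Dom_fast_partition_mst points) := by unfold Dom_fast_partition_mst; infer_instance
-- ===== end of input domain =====

-- B replaces basic_prim's best-distance array + index min-scan + decrease-key relaxation
-- by LAZY Prim over a bag of candidate edges (stale duplicates kept, lexicographic min
-- popped each round), and the chunk fold with its last-point accumulator by two sums;
-- objective: alternative structure (same result, no speed claim).

-- ===== PORT A =====

-- get_manhattan_dist (identical helper in both Python files)
def mdistA (p q : Int × Int) : Int := |p.1 - q.1| + |p.2 - q.2|

-- Python '<' where float('inf') is encoded as `none` (inf < inf is False)
def optLt (a b : Option Int) : Bool :=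
  match a, b with
  | none, _ => false
  | some _, none => true
  | some x, some y => decide (x < y)

-- inner scan `for i in range(n): if not visited[i] and min_dist[i] < curr_m: …`
-- (the Python list min_dist of length n is a List (Option Int), indexed only in range;
-- the Python list visited is encoded as a function Nat → Bool updated with Function.update)
def scanA (n : Nat) (visited : Nat → Bool) (minDist : List (Option Int)) : Int × Option Int :=
  (List.range n).foldl
    (fun s i =>
      if !visited i && optLt (minDist.getD i none) s.2 then ((i : Int), minDist.getD i none)
      else s)
    (-1, none)

-- `for v in range(n): if not visited[v]: d = …; if d < min_dist[v]: min_dist[v] = d`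
def relaxA (pts : List (Int × Int)) (n u : Nat) (visited : Nat → Bool)
    (minDist : List (Option Int)) : List (Option Int) :=
  (List.range n).foldl
    (fun md v =>
      if !visited v then
        if optLt (some (mdistA (pts.getD u (0,0)) (pts.getD v (0,0)))) (md.getD v none) then
          md.set v (some (mdistA (pts.getD u (0,0)) (pts.getD v (0,0))))
        else md
      else md)
    minDist

-- `for _ in range(n): … if u == -1: break …` (fuel = remaining iterations;
-- the pure scan result (u, curr_m) is referred to repeatedly instead of via a let)
def primLoopA (pts : List (Int × Int)) (n : Nat) :
    Nat → (Nat → Bool) → List (Option Int) → Int → Int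
  | 0, _, _, total => total
  | k+1, visited, minDist, total =>
    if (scanA n visited minDist).1 = -1 then total
    else
      primLoopA pts n k
        (Function.update visited (scanA n visited minDist).1.toNat true)
        (relaxA pts n (scanA n visited minDist).1.toNat
          (Function.update visited (scanA n visited minDist).1.toNat true) minDist)
        (total + (scanA n visited minDist).2.getD 0)  -- curr_m is finite whenever u ≠ -1

-- `min_dist = [inf] * n; min_dist[0] = 0`
def basic_prim (pts : List (Int × Int)) : Int :=
  if pts.length ≤ 1 then 0
  else primLoopA pts pts.length pts.length (fun _ => false)
    ((List.replicate pts.length (none : Option Int)).set 0 (some 0)) 0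

-- `sorted(points, key=…)` + chunking comprehension — identical lines in both Python files
def pvChunks (points : List (Int × Int)) : List (List (Int × Int)) :=
  (PySem.List.pyRange 0 ((PySem.List.sorted points (fun p => p.1) false).length) 100).map
    (fun i => PySem.List.slice (PySem.List.sorted points (fun p => p.1) false) (some i) (some (i + 100)))

-- loop body of A's chunk loop (state: running total, last point of previous chunk)
def chunkStepA (s : Int × Option (Int × Int)) (chunk : List (Int × Int)) :
    Int × Option (Int × Int) :=
  ((s.1 + basic_prim chunk) +
     (match s.2 with
      | some lp => mdistA lp (PySem.List.pyGetD chunk 0 (0,0))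
      | none => 0),
   some (PySem.List.pyGetD chunk (-1) (0,0)))

def fast_partition_mst (points : List (Int × Int)) : Int :=
  ((pvChunks points).foldl chunkStepA (0, none)).1

-- ===== PORT B =====

-- Python's `<` on the pairs (d, u) in the bag (tuples compare lexicographically)
def lexLtB (a b : Int × Nat) : Bool :=
  decide (a.1 < b.1) || (decide (a.1 = b.1) && decide (a.2 < b.2))

-- Python `min(bag)`: scan keeping the current best, replace on strict `<`
def bagMinB (bag : List (Int × Nat)) : Option (Int × Nat) :=
  match bag with
  | [] => none
  | e :: t => some (t.foldl (fun b f => if lexLtB f b then f else b) e)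

-- `while outside: d, u = min(bag); total += d; outside.remove(u);
--  bag = [e for e in bag if e[1] != u] + [(dist(u,v), v) for v in outside]`
-- (fuel = outside.length: each round removes exactly one member of outside)
def primLoopB (pts : List (Int × Int)) :
    Nat → List Nat → List (Int × Nat) → Int → Int
  | 0, _, _, total => total
  | k+1, outside, bag, total =>
    match bagMinB bag with
    | none => total   -- unreachable: the bag is nonempty while outside is
    | some e =>
      primLoopB pts k (outside.erase e.2)
        ((bag.filter (fun f => f.2 != e.2)) ++
          (outside.erase e.2).map (fun v => (mdistA (pts.getD e.2 (0,0)) (pts.getD v (0,0)), v)))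
        (total + e.1)

def basic_prim_alt (pts : List (Int × Int)) : Int :=
  if pts.length ≤ 1 then 0
  else primLoopB pts (pts.length - 1) (List.range' 1 (pts.length - 1))
    ((List.range' 1 (pts.length - 1)).map
      (fun v => (mdistA (pts.getD 0 (0,0)) (pts.getD v (0,0)), v))) 0

def fast_partition_mst_alt (points : List (Int × Int)) : Int :=
  ((pvChunks points).map basic_prim_alt).sum +
    (((pvChunks points).zip (pvChunks points).tail).map
      (fun ab => mdistA (PySem.List.pyGetD ab.1 (-1) (0,0)) (PySem.List.pyGetD ab.2 0 (0,0)))).sum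

-- ===== PRECONDITION & SPEC =====
def Spec_fast_partition_mst (points : List (Int × Int)) (out : Int) : Prop := out = fast_partition_mst_alt points
instance (points : List (Int × Int)) (out : Int) : Decidable (Spec_fast_partition_mst points out) := by unfold Spec_fast_partition_mst; infer_instance

-- ===== CLAIM (what is proved, stated in full; the proofs are below) =====
def Claim_equal_fast_partition_mst : Prop := ∀ (points : List (Int × Int)), Dom_fast_partition_mst points → Spec_fast_partition_mst points (fast_partition_mst points)

-- ===== LEMMAS AND PROOFS =====

-- getD/set helpers
theorem getD_set_ne' (l : List (Option Int)) (v w : Nat) (x : Option Int) (h : w ≠ v) :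
    (l.set v x).getD w none = l.getD w none := by
  simp [List.getD_eq_getElem?_getD, List.getElem?_set_ne (Ne.symm h)]

theorem getD_set_self' (l : List (Option Int)) (v : Nat) (x : Option Int) (h : v < l.length) :
    (l.set v x).getD v none = x := by
  simp [List.getD_eq_getElem?_getD, List.getElem?_set_self, h]

-- manhattan distance between indexed points
def dA (pts : List (Int × Int)) (u v : Nat) : Int :=
  mdistA (pts.getD u (0,0)) (pts.getD v (0,0))

-- A's best-distance of vertex v, read off the min_dist array
def keyOf (md : List (Option Int)) (v : Nat) : Int := (md.getD v none).getD 0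

-- ===== lexicographic order facts =====
theorem lexLtB_iff (a b : Int × Nat) :
    lexLtB a b = true ↔ (a.1 < b.1 ∨ (a.1 = b.1 ∧ a.2 < b.2)) := by
  simp [lexLtB]

theorem lexLtB_irrefl (a : Int × Nat) : lexLtB a a = false := by
  simp [lexLtB]

theorem lexLtB_trans {a b c : Int × Nat} (h1 : lexLtB a b = true) (h2 : lexLtB b c = true) :
    lexLtB a c = true := by
  rw [lexLtB_iff] at *
  rcases h1 with h1 | ⟨h1, h1'⟩ <;> rcases h2 with h2 | ⟨h2, h2'⟩
  · exact Or.inl (lt_trans h1 h2)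
  · exact Or.inl (h2 ▸ h1)
  · exact Or.inl (h1 ▸ h2)
  · exact Or.inr ⟨h1.trans h2, lt_trans h1' h2'⟩

theorem lexLtB_connex {a b : Int × Nat} (h1 : lexLtB a b = false) (h2 : lexLtB b a = false) :
    a = b := by
  have h1' := (not_iff_not.mpr (lexLtB_iff a b)).mp (by simp [h1])
  have h2' := (not_iff_not.mpr (lexLtB_iff b a)).mp (by simp [h2])
  push_neg at h1' h2'
  have e1 : a.1 = b.1 := le_antisymm (h2'.1) (h1'.1)
  have e2 : a.2 = b.2 := le_antisymm (h2'.2 e1.symm) (h1'.2 e1)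
  exact Prod.ext e1 e2

-- x is a lexicographic minimum of the multiset S
def isLexMin (x : Int × Nat) (S : List (Int × Nat)) : Prop :=
  x ∈ S ∧ ∀ f ∈ S, lexLtB f x = false

theorem isLexMin_unique {x y : Int × Nat} {S : List (Int × Nat)}
    (hx : isLexMin x S) (hy : isLexMin y S) : x = y :=
  lexLtB_connex (hy.2 x hx.1) (hx.2 y hy.1)

-- ===== B's min(bag) returns a lexicographic minimum =====
theorem bagfold_min :
    ∀ (t : List (Int × Nat)) (e0 : Int × Nat),
      isLexMin (t.foldl (fun b f => if lexLtB f b then f else b) e0) (e0 :: t) := by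
  intro t
  induction t with
  | nil =>
    intro e0
    refine ⟨List.mem_cons_self, ?_⟩
    intro f hf
    rcases List.mem_cons.mp hf with rfl | h
    · exact lexLtB_irrefl f
    · exact absurd h List.not_mem_nil
  | cons f t ih =>
    intro e0
    rw [List.foldl_cons]
    by_cases hfe : lexLtB f e0 = true
    · rw [if_pos hfe]
      obtain ⟨hmem, hmin⟩ := ih f
      have hmr : lexLtB f (t.foldl (fun b f => if lexLtB f b then f else b) f) = false :=
        hmin _ List.mem_cons_self
      refine ⟨?_, ?_⟩
      · rcases List.mem_cons.mp hmem with h | h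
        · rw [h]; exact List.mem_cons_of_mem _ List.mem_cons_self
        · exact List.mem_cons_of_mem _ (List.mem_cons_of_mem _ h)
      · intro g hg
        rcases List.mem_cons.mp hg with heq1 | hg'
        · -- g = e0: f beats e0 and the result beats f
          rw [heq1]
          by_contra hc
          rw [Bool.not_eq_false] at hc
          exact absurd (lexLtB_trans hfe hc) (by simp [hmr])
        rcases List.mem_cons.mp hg' with heq2 | hg''
        · rw [heq2]; exact hmr
        · exact hmin g (List.mem_cons_of_mem _ hg'')
    · rw [if_neg hfe]
      obtain ⟨hmem, hmin⟩ := ih e0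
      have hmr : lexLtB e0 (t.foldl (fun b f => if lexLtB f b then f else b) e0) = false :=
        hmin _ List.mem_cons_self
      have hfe' : lexLtB f e0 = false := by simpa using hfe
      refine ⟨?_, ?_⟩
      · rcases List.mem_cons.mp hmem with h | h
        · rw [h]; exact List.mem_cons_self
        · exact List.mem_cons_of_mem _ (List.mem_cons_of_mem _ h)
      · intro g hg
        rcases List.mem_cons.mp hg with heq1 | hg'
        · rw [heq1]; exact hmr
        rcases List.mem_cons.mp hg' with heq2 | hg''
        · -- g = f: e0 weakly beats f and the result beats e0
          rw [heq2]
          by_contra hc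
          rw [Bool.not_eq_false] at hc
          by_cases heq : f = e0
          · rw [heq] at hc; simp [hmr] at hc
          · have hef : lexLtB e0 f = true := by
              by_contra h'
              exact heq (lexLtB_connex hfe' (by simpa using h'))
            exact absurd (lexLtB_trans hef hc) (by simp [hmr])
        · exact hmin g (List.mem_cons_of_mem _ hg'')

theorem bagMinB_spec (bag : List (Int × Nat)) (hne : bag ≠ []) :
    ∃ e, bagMinB bag = some e ∧ isLexMin e bag := by
  cases bag with
  | nil => exact absurd rfl hne
  | cons e0 t => exact ⟨_, rfl, bagfold_min t e0⟩

-- ===== A's min-scan returns the same lexicographic minimum =====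
-- A's scan step (after the visited-mask has been turned into a filter)
def gScan (minDist : List (Option Int)) (s : Int × Option Int) (i : Nat) : Int × Option Int :=
  if optLt (minDist.getD i none) s.2 then ((i : Int), minDist.getD i none) else s

theorem foldl_mask {σ : Type} (p : Nat → Bool) (c : σ → Nat → Bool) (h : σ → Nat → σ) :
    ∀ (l : List Nat) (s : σ),
      l.foldl (fun s i => if p i && c s i then h s i else s) s
        = (l.filter p).foldl (fun s i => if c s i then h s i else s) s := by
  intro l
  induction l with
  | nil => intro s; rfl
  | cons i t ih =>
    intro s
    rw [List.foldl_cons, List.filter_cons]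
    cases hp : p i with
    | false =>
      simp only [hp, Bool.false_and, Bool.false_eq_true, if_false, cond_false]
      exact ih s
    | true =>
      simp only [hp, Bool.true_and, cond_true, List.foldl_cons]
      exact ih _

theorem scanA_eq (n : Nat) (visited : Nat → Bool) (minDist : List (Option Int)) :
    scanA n visited minDist
      = ((List.range n).filter (fun i => !visited i)).foldl (gScan minDist) (-1, none) := by
  have h := foldl_mask (fun i => !visited i) (fun s i => optLt (minDist.getD i none) s.2)
    (fun s i => ((i : Int), minDist.getD i none)) (List.range n) ((-1 : Int), (none : Option Int))
  simpa [scanA, gScan] using h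

-- accumulator form: scanning a strictly increasing tail from a finite best
theorem scan_lexmin_acc (md : List (Option Int)) (kf : Nat → Int) :
    ∀ (t : List Nat) (v0 : Nat) (m : Int),
      (∀ i ∈ t, md.getD i none = some (kf i)) → t.Pairwise (· < ·) → (∀ i ∈ t, v0 < i) →
      ∃ v1 m1, t.foldl (gScan md) (((v0 : Nat) : Int), some m) = (((v1 : Nat) : Int), some m1)
        ∧ isLexMin (m1, v1) ((m, v0) :: t.map (fun v => (kf v, v))) := by
  intro t
  induction t with
  | nil =>
    intro v0 m _ _ _
    refine ⟨v0, m, rfl, List.mem_cons_self, ?_⟩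
    intro f hf
    rcases List.mem_cons.mp hf with heq | h
    · rw [heq]; exact lexLtB_irrefl _
    · exact absurd h List.not_mem_nil
  | cons i t ih =>
    intro v0 m hmd hpw hgt
    have hmdi : md.getD i none = some (kf i) := hmd i List.mem_cons_self
    have hmd' : ∀ j ∈ t, md.getD j none = some (kf j) := fun j hj => hmd j (List.mem_cons_of_mem _ hj)
    have hpw' := (List.pairwise_cons.mp hpw).2
    have higt := (List.pairwise_cons.mp hpw).1
    rw [List.foldl_cons]
    by_cases hlt : kf i < m
    · have hg : gScan md (((v0 : Nat) : Int), some m) i = (((i : Nat) : Int), some (kf i)) := by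
        unfold gScan; rw [hmdi]; simp [optLt, hlt]
      rw [hg]
      obtain ⟨v1, m1, hfold, hmem, hmin⟩ := ih i (kf i) hmd' hpw' higt
      refine ⟨v1, m1, hfold, ?_, ?_⟩
      · rcases List.mem_cons.mp hmem with h | h
        · rw [List.map_cons, h]
          exact List.mem_cons_of_mem _ List.mem_cons_self
        · rw [List.map_cons]
          exact List.mem_cons_of_mem _ (List.mem_cons_of_mem _ h)
      · intro f hf
        rcases List.mem_cons.mp hf with heq1 | hf'
        · -- f = (m, v0): (kf i, i) beats it and the result beats (kf i, i)
          rw [heq1]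
          have h1 : lexLtB (kf i, i) (m, v0) = true := by
            rw [lexLtB_iff]; exact Or.inl hlt
          have h2 : lexLtB (kf i, i) (m1, v1) = false := hmin _ List.mem_cons_self
          by_contra hc
          rw [Bool.not_eq_false] at hc
          exact absurd (lexLtB_trans h1 hc) (by simp [h2])
        · rw [List.map_cons] at hf'
          exact hmin f hf'
    · have hg : gScan md (((v0 : Nat) : Int), some m) i = (((v0 : Nat) : Int), some m) := by
        unfold gScan; rw [hmdi]; simp [optLt, hlt]
      rw [hg]
      have hgt' : ∀ j ∈ t, v0 < j := fun j hj => lt_trans (hgt i List.mem_cons_self) (higt j hj)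
      obtain ⟨v1, m1, hfold, hmem, hmin⟩ := ih v0 m hmd' hpw' hgt'
      refine ⟨v1, m1, hfold, ?_, ?_⟩
      · rcases List.mem_cons.mp hmem with h | h
        · rw [h]; exact List.mem_cons_self
        · rw [List.map_cons]
          exact List.mem_cons_of_mem _ (List.mem_cons_of_mem _ h)
      · intro f hf
        rcases List.mem_cons.mp hf with heq1 | hf'
        · rw [heq1]; exact hmin _ List.mem_cons_self
        rw [List.map_cons] at hf'
        rcases List.mem_cons.mp hf' with heq2 | hf''
        · -- f = (kf i, i) with ¬ kf i < m and v0 < i: it cannot beat the result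
          rw [heq2]
          by_contra hc
          rw [Bool.not_eq_false] at hc
          rcases List.mem_cons.mp hmem with h | h
          · -- result = (m, v0)
            rw [h] at hc
            rw [lexLtB_iff] at hc
            rcases hc with hc | ⟨hc1, hc2⟩
            · exact hlt hc
            · have hvi := hgt i List.mem_cons_self
              simp only at hc2
              omega
          · -- result = (kf j, j) for some j ∈ t, and result beats (m, v0) weakly
            obtain ⟨j, hj, hje⟩ := List.mem_map.mp h
            have hnb : lexLtB (m, v0) (m1, v1) = false := hmin _ List.mem_cons_self
            rw [lexLtB_iff] at hc
            have hv1 : j = v1 := congrArg Prod.snd hje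
            have hm1 : kf j = m1 := congrArg Prod.fst hje
            have hij : i < j := higt j hj
            have hv0v1 : v0 < v1 := by rw [← hv1]; exact lt_trans (hgt i List.mem_cons_self) hij
            have hm1m : m1 < m := by
              have := (not_iff_not.mpr (lexLtB_iff (m, v0) (m1, v1))).mp (by simp [hnb])
              push_neg at this
              rcases lt_or_eq_of_le this.1 with h' | h'
              · exact h'
              · exact absurd hv0v1 (by have := this.2 h'.symm; omega)
            rcases hc with hc | ⟨hc1, hc2⟩
            · -- kf i < m1 < m contradicts ¬ kf i < m? kf i ≥ m > m1, so kf i < m1 impossible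
              simp only at hc
              omega
            · simp only at hc1 hc2
              omega
        · exact hmin f (List.mem_cons_of_mem _ hf'')

theorem scan_lexmin (md : List (Option Int)) (kf : Nat → Int) (l : List Nat) (hne : l ≠ [])
    (hmd : ∀ i ∈ l, md.getD i none = some (kf i)) (hpw : l.Pairwise (· < ·)) :
    ∃ v0 m, l.foldl (gScan md) (-1, none) = (((v0 : Nat) : Int), some m)
      ∧ isLexMin (m, v0) (l.map (fun v => (kf v, v))) := by
  cases l with
  | nil => exact absurd rfl hne
  | cons i t =>
    have hmdi : md.getD i none = some (kf i) := hmd i List.mem_cons_self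
    have hg : gScan md (-1, none) i = (((i : Nat) : Int), some (kf i)) := by
      unfold gScan; rw [hmdi]; simp [optLt]
    rw [List.foldl_cons, hg]
    obtain ⟨v1, m1, hfold, hmem, hmin⟩ := scan_lexmin_acc md kf t i (kf i)
      (fun j hj => hmd j (List.mem_cons_of_mem _ hj))
      (List.pairwise_cons.mp hpw).2 (List.pairwise_cons.mp hpw).1
    exact ⟨v1, m1, hfold, by simpa using hmem, by simpa using hmin⟩

-- ===== relaxation: pointwise evaluation of the fold over range n =====
def relStep (pts : List (Int × Int)) (u : Nat) (visited : Nat → Bool)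
    (md : List (Option Int)) (v : Nat) : List (Option Int) :=
  if !visited v then
    if optLt (some (dA pts u v)) (md.getD v none) then md.set v (some (dA pts u v)) else md
  else md

theorem relaxA_eq (pts : List (Int × Int)) (n u : Nat) (visited : Nat → Bool)
    (md : List (Option Int)) :
    relaxA pts n u visited md = (List.range n).foldl (relStep pts u visited) md := rfl

theorem relStep_length (pts : List (Int × Int)) (u : Nat) (visited : Nat → Bool)
    (md : List (Option Int)) (v : Nat) :
    (relStep pts u visited md v).length = md.length := by
  unfold relStep
  split_ifs <;> simp

theorem foldl_rel_length (pts : List (Int × Int)) (u : Nat) (visited : Nat → Bool) :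
    ∀ (l : List Nat) (md : List (Option Int)),
      (l.foldl (relStep pts u visited) md).length = md.length := by
  intro l
  induction l with
  | nil => intro md; rfl
  | cons i t ih => intro md; rw [List.foldl_cons, ih, relStep_length]

theorem relStep_apply_ne (pts : List (Int × Int)) (u : Nat) (visited : Nat → Bool)
    (md : List (Option Int)) (v x : Nat) (hx : x ≠ v) :
    (relStep pts u visited md v).getD x none = md.getD x none := by
  unfold relStep
  split_ifs
  · exact getD_set_ne' md v x _ hx
  · rfl
  · rfl

theorem foldl_rel_notmem (pts : List (Int × Int)) (u : Nat) (visited : Nat → Bool) :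
    ∀ (l : List Nat) (md : List (Option Int)) (x : Nat), x ∉ l →
      (l.foldl (relStep pts u visited) md).getD x none = md.getD x none := by
  intro l
  induction l with
  | nil => intro md x _; rfl
  | cons i t ih =>
    intro md x hx
    have hxi : x ≠ i := fun h => hx (h ▸ List.mem_cons_self)
    have hxt : x ∉ t := fun h => hx (List.mem_cons_of_mem _ h)
    rw [List.foldl_cons, ih _ x hxt, relStep_apply_ne _ _ _ _ _ _ hxi]

theorem foldl_rel_eval (pts : List (Int × Int)) (u : Nat) (visited : Nat → Bool) :
    ∀ (l : List Nat) (md : List (Option Int)) (x : Nat), l.Nodup → x ∈ l → x < md.length →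
      (l.foldl (relStep pts u visited) md).getD x none
        = if !visited x then
            (if optLt (some (dA pts u x)) (md.getD x none) then some (dA pts u x)
             else md.getD x none)
          else md.getD x none := by
  intro l
  induction l with
  | nil => intro md x _ hx _; exact absurd hx (List.not_mem_nil)
  | cons i t ih =>
    intro md x hnd hx hxlen
    have hnd' := List.nodup_cons.mp hnd
    rw [List.foldl_cons]
    rcases List.mem_cons.mp hx with rfl | hxt
    · rw [foldl_rel_notmem pts u visited t _ x hnd'.1]
      unfold relStep
      split_ifs
      · exact getD_set_self' md x _ hxlen
      · rfl
      · rfl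
    · have hxi : x ≠ i := fun h => hnd'.1 (h ▸ hxt)
      have hxlen' : x < (relStep pts u visited md i).length := by
        rw [relStep_length]; exact hxlen
      rw [ih _ x hnd'.2 hxt hxlen', relStep_apply_ne _ _ _ _ _ _ hxi]

theorem relaxA_eval (pts : List (Int × Int)) (n u : Nat) (visited : Nat → Bool)
    (md : List (Option Int)) (x : Nat) (hx : x < n) (hxlen : x < md.length) :
    (relaxA pts n u visited md).getD x none
      = if !visited x then
          (if optLt (some (dA pts u x)) (md.getD x none) then some (dA pts u x)
           else md.getD x none)
        else md.getD x none := by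
  rw [relaxA_eq]
  exact foldl_rel_eval pts u visited (List.range n) md x (List.nodup_range)
    (List.mem_range.mpr hx) hxlen

-- ===== main simulation: A's array Prim = B's lazy edge-bag Prim =====
theorem prim_sim (pts : List (Int × Int)) :
    ∀ (k : Nat) (visited : Nat → Bool) (minDist : List (Option Int))
      (outside : List Nat) (bag : List (Int × Nat)) (total : Int),
      outside.length = k →
      minDist.length = pts.length →
      (List.range pts.length).filter (fun i => !visited i) = outside →
      (∀ v ∈ outside, minDist.getD v none = some (keyOf minDist v)) →
      (∀ v ∈ outside, (keyOf minDist v, v) ∈ bag) →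
      (∀ e ∈ bag, e.2 ∈ outside ∧ keyOf minDist e.2 ≤ e.1) →
      primLoopA pts pts.length k visited minDist total = primLoopB pts k outside bag total := by
  intro k
  induction k with
  | zero => intro visited minDist outside bag total _ _ _ _ _ _; rfl
  | succ k ih =>
    intro visited minDist outside bag total hlen hlmd hfil h2 h3 h4
    have hone : outside ≠ [] := by intro h; subst h; simp at hlen
    have hpw : outside.Pairwise (· < ·) :=
      hfil ▸ (List.pairwise_lt_range).sublist List.filter_sublist
    have hnodup : outside.Nodup := hpw.imp (fun h => Nat.ne_of_lt h)
    -- A's scan = lexicographic minimum of the keyed outside list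
    obtain ⟨v0, m, hscan, hkmin⟩ := scan_lexmin minDist (keyOf minDist) outside hone h2 hpw
    have hscanA : scanA pts.length visited minDist = (((v0 : Nat) : Int), some m) := by
      rw [scanA_eq, hfil]; exact hscan
    obtain ⟨v0', hv0'mem, hv0'eq⟩ := List.mem_map.mp hkmin.1
    have hv0 : v0' = v0 := congrArg Prod.snd hv0'eq
    have hm : m = keyOf minDist v0 := by
      have := congrArg Prod.fst hv0'eq
      simp only at this
      rw [← this, hv0]
    have hv0mem : v0 ∈ outside := hv0 ▸ hv0'mem
    -- B's pop = the same pair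
    have hbagne : bag ≠ [] := by
      intro h
      exact absurd (h ▸ h3 v0 hv0mem) List.not_mem_nil
    obtain ⟨e, hpop, hemem, hemin⟩ := bagMinB_spec bag hbagne
    have hbmin : isLexMin (m, v0) bag := by
      refine ⟨hm ▸ h3 v0 hv0mem, ?_⟩
      intro f hf
      obtain ⟨hfo, hfk⟩ := h4 f hf
      have hkf : lexLtB (keyOf minDist f.2, f.2) (m, v0) = false :=
        hkmin.2 _ (List.mem_map_of_mem hfo)
      have hkf' := (not_iff_not.mpr (lexLtB_iff (keyOf minDist f.2, f.2) (m, v0))).mp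
        (by simp [hkf])
      push_neg at hkf'
      rw [Bool.eq_false_iff]
      intro hc
      rw [lexLtB_iff] at hc
      rcases hc with hc | ⟨hc1, hc2⟩
      · exact absurd (lt_of_le_of_lt hfk hc) (not_lt.mpr hkf'.1)
      · have hmeq : keyOf minDist f.2 = m := le_antisymm (le_of_le_of_eq hfk hc1) hkf'.1
        have h5 := hkf'.2 hmeq
        simp only at hc2 h5
        omega
    have he : e = (m, v0) := isLexMin_unique ⟨hemem, hemin⟩ hbmin
    -- unfold one step of both loops
    have hvne : ¬(((v0 : Nat) : Int) = -1) := by omega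
    rw [primLoopA, hscanA, if_neg hvne]
    rw [primLoopB, hpop, he]
    simp only [Int.toNat_natCast, Option.getD_some]
    -- names for the updated states
    have hvis : visited v0 = false := by
      have : v0 ∈ (List.range pts.length).filter (fun i => !visited i) := hfil ▸ hv0mem
      have := (List.mem_filter.mp this).2
      simpa using this
    have hv0lt : v0 < pts.length := by
      have : v0 ∈ (List.range pts.length).filter (fun i => !visited i) := hfil ▸ hv0mem
      exact List.mem_range.mp (List.mem_of_mem_filter this)
    have herase : outside.erase v0 = outside.filter (fun v => v ≠ v0) := by
      rw [List.Nodup.erase_eq_filter hnodup]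
      refine List.filter_congr (fun a _ => ?_)
      by_cases h : a = v0
      · simp [h]
      · simp [h]
    have hmemE : ∀ v, v ∈ outside.erase v0 ↔ (v ∈ outside ∧ v ≠ v0) := by
      intro v
      rw [herase, List.mem_filter]
      simp
    -- evaluation of the new min_dist on surviving outside vertices
    have hkey' : ∀ v ∈ outside.erase v0,
        (relaxA pts pts.length v0 (Function.update visited v0 true) minDist).getD v none
          = some (if dA pts v0 v < keyOf minDist v then dA pts v0 v else keyOf minDist v) := by
      intro v hv
      obtain ⟨hvo, hvne⟩ := (hmemE v).mp hv
      have hvlt : v < pts.length := by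
        have : v ∈ (List.range pts.length).filter (fun i => !visited i) := hfil ▸ hvo
        exact List.mem_range.mp (List.mem_of_mem_filter this)
      have hvvis : visited v = false := by
        have : v ∈ (List.range pts.length).filter (fun i => !visited i) := hfil ▸ hvo
        have := (List.mem_filter.mp this).2
        simpa using this
      rw [relaxA_eval pts pts.length v0 (Function.update visited v0 true) minDist v hvlt
        (hlmd ▸ hvlt), Function.update_of_ne hvne, hvvis]
      rw [h2 v hvo]
      simp only [Bool.not_false, if_true, optLt]
      split_ifs with h' h'' h'' <;> simp_all
    have hkeyOf' : ∀ v ∈ outside.erase v0,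
        keyOf (relaxA pts pts.length v0 (Function.update visited v0 true) minDist) v
          = (if dA pts v0 v < keyOf minDist v then dA pts v0 v else keyOf minDist v) := by
      intro v hv
      unfold keyOf
      rw [hkey' v hv]
      rfl
    apply ih
    · -- fuel: erase of a member
      rw [List.length_erase_of_mem hv0mem, hlen]
      omega
    · rw [relaxA_eq, foldl_rel_length]; exact hlmd
    · -- filter characterization
      have hfun : (fun i => !Function.update visited v0 true i)
          = fun i => ((i != v0) && !visited i) := by
        funext i
        by_cases h : i = v0
        · subst h; simp [Function.update_self]
        · simp [h]
      calc (List.range pts.length).filter (fun i => !Function.update visited v0 true i)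
          = (List.range pts.length).filter (fun i => (i != v0) && !visited i) := by rw [hfun]
        _ = ((List.range pts.length).filter (fun i => !visited i)).filter (fun i => i != v0) := by
              rw [List.filter_filter]
        _ = outside.filter (fun i => i != v0) := by rw [hfil]
        _ = outside.erase v0 := by
              rw [herase]
              refine List.filter_congr (fun a _ => ?_)
              by_cases h : a = v0 <;> simp [h]
    · -- H2: min_dist is finite on the new outside
      intro v hv
      rw [hkey' v hv, hkeyOf' v hv]
    · -- H3: the bag attains the new key
      intro v hv
      obtain ⟨hvo, hvne⟩ := (hmemE v).mp hv
      rw [hkeyOf' v hv]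
      by_cases hlt : dA pts v0 v < keyOf minDist v
      · rw [if_pos hlt]
        exact List.mem_append_right _ (List.mem_map_of_mem hv)
      · rw [if_neg hlt]
        apply List.mem_append_left
        rw [List.mem_filter]
        exact ⟨h3 v hvo, by simpa using hvne⟩
    · -- H4: every bag entry sits at or above the new key of its vertex
      intro f hf
      rcases List.mem_append.mp hf with hf | hf
      · obtain ⟨hfb, hfne⟩ := List.mem_filter.mp hf
        obtain ⟨hfo, hfk⟩ := h4 f hfb
        have hfmem : f.2 ∈ outside.erase v0 := (hmemE f.2).mpr ⟨hfo, by simpa using hfne⟩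
        refine ⟨hfmem, ?_⟩
        rw [hkeyOf' f.2 hfmem]
        split_ifs with h'
        · exact le_of_lt (lt_of_lt_of_le h' hfk)
        · exact hfk
      · obtain ⟨v, hv, hve⟩ := List.mem_map.mp hf
        refine ⟨by rw [← hve]; exact hv, ?_⟩
        rw [← hve]
        simp only
        rw [hkeyOf' v hv]
        split_ifs with h'
        · exact le_refl _
        · exact le_of_not_gt h'

-- ===== basic_prim = basic_prim_alt =====
theorem getD_init_pos (N i : Nat) (hi : i ≠ 0) :
    ((List.replicate N (none : Option Int)).set 0 (some 0)).getD i none = none := by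
  rw [getD_set_ne' _ _ _ _ hi, List.getD_eq_getElem?_getD, List.getElem?_replicate]
  split <;> rfl

theorem getD_init_zero (N : Nat) (hN : 0 < N) :
    ((List.replicate N (none : Option Int)).set 0 (some 0)).getD 0 none = some 0 := by
  apply getD_set_self'
  simpa using hN

theorem foldl_scan_none (minDist : List (Option Int)) :
    ∀ (l : List Nat) (s : Int × Option Int), (∀ i ∈ l, minDist.getD i none = none) →
      l.foldl (gScan minDist) s = s := by
  intro l
  induction l with
  | nil => intro s _; rfl
  | cons i t ih =>
    intro s h
    have hi : minDist.getD i none = none := h i List.mem_cons_self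
    have hg : gScan minDist s i = s := by
      unfold gScan
      rw [hi]
      simp [optLt]
    rw [List.foldl_cons, hg, ih s (fun j hj => h j (List.mem_cons_of_mem _ hj))]

theorem basic_prim_eq (pts : List (Int × Int)) : basic_prim pts = basic_prim_alt pts := by
  unfold basic_prim basic_prim_alt
  by_cases h1 : pts.length ≤ 1
  · simp [h1]
  · rw [if_neg h1, if_neg h1]
    obtain ⟨mm, hm⟩ : ∃ mm, pts.length = mm + 1 + 1 := ⟨pts.length - 2, by omega⟩
    have hR1 : (List.range (mm + 1)).map Nat.succ = List.range' 1 (mm + 1) := by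
      rw [List.range'_eq_map_range]
      apply List.map_congr_left
      intro a _; omega
    have hsplit : List.range (mm + 1 + 1) = 0 :: List.range' 1 (mm + 1) := by
      rw [List.range_succ_eq_map, hR1]
    have hscan0 : scanA (mm + 1 + 1) (fun _ => false)
        ((List.replicate (mm + 1 + 1) (none : Option Int)).set 0 (some 0))
        = (((0 : Nat) : Int), some 0) := by
      rw [scanA_eq]
      simp only [Bool.not_false, List.filter_true]
      rw [hsplit, List.foldl_cons]
      have hg : gScan ((List.replicate (mm + 1 + 1) (none : Option Int)).set 0 (some 0))
          (-1, none) 0 = (((0 : Nat) : Int), some 0) := by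
        unfold gScan
        rw [getD_init_zero (mm + 1 + 1) (by omega)]
        simp [optLt]
      rw [hg]
      apply foldl_scan_none
      intro i hi
      have : 1 ≤ i := (List.mem_range'_1.mp hi).1
      exact getD_init_pos (mm + 1 + 1) i (by omega)
    rw [hm]
    rw [primLoopA, hscan0]
    rw [if_neg (by omega)]
    simp only [Int.toNat_natCast, Option.getD_some, Nat.add_sub_cancel]
    have htot : (0 : Int) + 0 = 0 := by norm_num
    rw [htot, ← hm]
    -- the new min_dist reads d(0, w) on every outside vertex
    have hmd1 : ∀ w ∈ List.range' 1 (pts.length - 1),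
        (relaxA pts pts.length 0 (Function.update (fun _ => false) 0 true)
          ((List.replicate pts.length (none : Option Int)).set 0 (some 0))).getD w none
          = some (dA pts 0 w) := by
      intro w hw
      have hw1 : 1 ≤ w := (List.mem_range'_1.mp hw).1
      have hwlt : w < pts.length := by
        have := (List.mem_range'_1.mp hw).2
        omega
      rw [relaxA_eval pts pts.length 0 (Function.update (fun _ => false) 0 true)
        ((List.replicate pts.length (none : Option Int)).set 0 (some 0)) w hwlt
        (by simpa using hwlt)]
      have hwne : w ≠ 0 := by omega
      rw [Function.update_of_ne hwne]
      simp only [Bool.not_false, if_true]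
      rw [getD_init_pos pts.length w hwne]
      simp [optLt]
    have hkey1 : ∀ w ∈ List.range' 1 (pts.length - 1),
        keyOf (relaxA pts pts.length 0 (Function.update (fun _ => false) 0 true)
          ((List.replicate pts.length (none : Option Int)).set 0 (some 0))) w = dA pts 0 w := by
      intro w hw
      unfold keyOf
      rw [hmd1 w hw]
      rfl
    have hm1 : mm + 1 = pts.length - 1 := by omega
    rw [hm1]
    apply prim_sim
    · simp
    · rw [relaxA_eq, foldl_rel_length]; simp
    · -- filter characterization for the initial outside list
      rw [hm, hsplit]
      rw [List.filter_cons]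
      have h0 : (!Function.update (fun _ => false) 0 true 0) = false := by
        simp [Function.update_self]
      rw [h0]
      simp only [Bool.false_eq_true, if_false]
      have hfe : (List.range' 1 (mm + 1)).filter
          (fun i => !Function.update (fun _ => false) 0 true i)
          = List.range' 1 (mm + 1) := by
        apply List.filter_eq_self.mpr
        intro i hi
        have h1i : 1 ≤ i := (List.mem_range'_1.mp hi).1
        have : i ≠ 0 := by omega
        simp [Function.update_of_ne this]
      rw [hfe]
      congr 1
    · intro v hv
      rw [hmd1 v hv, hkey1 v hv]
    · intro v hv
      rw [hkey1 v hv]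
      exact List.mem_map_of_mem hv
    · intro f hf
      obtain ⟨v, hv, hve⟩ := List.mem_map.mp hf
      refine ⟨by rw [← hve]; exact hv, ?_⟩
      rw [← hve]
      simp only
      rw [hkey1 v hv]
      exact le_of_eq rfl

-- ===== outer chunk loop = two sums =====
def connOpt (lp : Option (Int × Int)) (chunks : List (List (Int × Int))) : Int :=
  match lp with
  | none => 0
  | some p =>
    match chunks with
    | [] => 0
    | c :: _ => mdistA p (PySem.List.pyGetD c 0 (0,0))

def zipSum (chunks : List (List (Int × Int))) : Int :=
  ((chunks.zip chunks.tail).map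
    (fun ab => mdistA (PySem.List.pyGetD ab.1 (-1) (0,0)) (PySem.List.pyGetD ab.2 0 (0,0)))).sum

theorem chunk_fold :
    ∀ (chunks : List (List (Int × Int))) (t : Int) (lp : Option (Int × Int)),
      (chunks.foldl chunkStepA (t, lp)).1
        = t + (chunks.map basic_prim).sum + connOpt lp chunks + zipSum chunks := by
  intro chunks
  induction chunks with
  | nil => intro t lp; cases lp <;> simp [connOpt, zipSum]
  | cons c cs ih =>
    intro t lp
    rw [List.foldl_cons]
    have hstep : chunkStepA (t, lp) c
        = (t + basic_prim c + connOpt lp (c :: cs), some (PySem.List.pyGetD c (-1) (0,0))) := by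
      cases lp <;> simp [chunkStepA, connOpt]
    rw [hstep, ih]
    have hz : zipSum (c :: cs)
        = connOpt (some (PySem.List.pyGetD c (-1) (0,0))) cs + zipSum cs := by
      cases cs with
      | nil => simp [zipSum, connOpt]
      | cons c' cs' => simp [zipSum, connOpt]
    rw [hz]
    simp only [List.map_cons, List.sum_cons]
    ring

-- ===== VERDICT (by name: the statement is the Claim_ definition above) =====
theorem fast_partition_mst_spec : Claim_equal_fast_partition_mst := by
  intro points _
  show fast_partition_mst points = fast_partition_mst_alt points
  unfold fast_partition_mst fast_partition_mst_alt
  rw [chunk_fold]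
  have hmap : (pvChunks points).map basic_prim = (pvChunks points).map basic_prim_alt :=
    List.map_congr_left (fun c _ => basic_prim_eq c)
  rw [hmap]
  show 0 + _ + connOpt none _ + zipSum (pvChunks points) = _ + zipSum (pvChunks points)
  simp [connOpt]
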